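-- pv_equiv track=rewrite | github.com/maybeluo/KDDCup2020-RL-1st-solution | model/utils.py | rehash
-- ===== SOURCE A (Python) =====
-- def rehash(dispatch_observ):
--     driver_id_orig2new = dict()
--     order_id_orig2new = dict()
--     driver_id_new2orig = list()
--     order_id_new2orig = list()
--     driver_cnt = 0
--     order_cnt = 0
--     for each in dispatch_observ:
--         driver_id = each["driver_id"]
--         if driver_id not in driver_id_orig2new:
--             driver_id_orig2new[driver_id] = driver_cnt
--             driver_id_new2orig.append(driver_id)
--             driver_cnt += 1
--         order_id = each["order_id"]
--         if order_id not in order_id_orig2new: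
--             order_id_orig2new[order_id] = order_cnt
--             order_id_new2orig.append(order_id)
--             order_cnt += 1
--     return driver_id_orig2new, order_id_orig2new, driver_id_new2orig, order_id_new2orig
-- ===== SOURCE B (Python) =====
-- def rehash(dispatch_observ):
--     observ = list(dispatch_observ)
--
--     def uniques(key):
--         vals = [e[key] for e in observ]
--         out = []
--         while vals:
--             head = vals[0]
--             out.append(head)
--             vals = [v for v in vals[1:] if v != head]
--         return out
--
--     driver_id_new2orig = uniques("driver_id")
--     order_id_new2orig = uniques("order_id")
--     driver_id_orig2new = {x: i for i, x in enumerate(driver_id_new2orig)}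
--     order_id_orig2new = {x: i for i, x in enumerate(order_id_new2orig)}
--     return driver_id_orig2new, order_id_orig2new, driver_id_new2orig, order_id_new2orig
-- ===== Notes on version B (the rewrite author's own statement) =====
-- stated objective: alternative
-- what changed: Replaces A's single interleaved hash-dict-and-counter loop by per-field filter-based extraction (repeatedly take the head of the remaining values and filter out its later duplicates, no hashing), then derive each orig2new dict by enumerating the dedup list.
import Mathlib
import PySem

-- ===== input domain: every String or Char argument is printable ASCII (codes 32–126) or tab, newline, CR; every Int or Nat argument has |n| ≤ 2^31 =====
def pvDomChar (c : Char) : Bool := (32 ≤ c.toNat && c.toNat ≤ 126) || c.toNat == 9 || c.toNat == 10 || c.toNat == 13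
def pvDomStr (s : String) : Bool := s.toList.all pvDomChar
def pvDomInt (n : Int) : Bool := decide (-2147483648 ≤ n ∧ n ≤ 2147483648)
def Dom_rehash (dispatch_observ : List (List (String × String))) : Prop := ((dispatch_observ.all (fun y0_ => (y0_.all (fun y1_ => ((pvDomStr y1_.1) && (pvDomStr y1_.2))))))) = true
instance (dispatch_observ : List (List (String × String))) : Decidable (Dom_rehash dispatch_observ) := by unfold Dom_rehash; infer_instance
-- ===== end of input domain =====

-- B replaces A's single interleaved hash-dict-and-counter loop by per-field filter-based
-- extraction (take the head, filter out its later duplicates, repeat; no hashing), then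
-- derives each orig2new dict by enumerating the dedup list (objective: alternative).


-- each["key"]: first-match lookup in the association list (Python dict access);
-- total form with default "" — used only under Pre_rehash, where the key is present.
def pvGetKey (k : String) (e : List (String × String)) : String :=
  ((PySem.Dict.mk e).get? k).getD ""

-- ===== PORT A =====
-- the loop body of A, with the whole mutable state as arguments
def rehashLoop : List (List (String × String)) → PySem.Dict String Int → PySem.Dict String Int → List String → List String → Int → Int → (List (String × Int)) × (List (String × Int)) × List String × List String
  | [], d2n, o2n, dl, ol, _, _ => (d2n.items, o2n.items, dl, ol)
  | e :: rest, d2n, o2n, dl, ol, dcnt, ocnt =>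
    let did := pvGetKey "driver_id" e
    let d2n' := if d2n.contains did then d2n else d2n.insert did dcnt
    let dl'  := if d2n.contains did then dl else dl ++ [did]
    let dcnt' := if d2n.contains did then dcnt else dcnt + 1
    let oid := pvGetKey "order_id" e
    let o2n' := if o2n.contains oid then o2n else o2n.insert oid ocnt
    let ol'  := if o2n.contains oid then ol else ol ++ [oid]
    let ocnt' := if o2n.contains oid then ocnt else ocnt + 1
    rehashLoop rest d2n' o2n' dl' ol' dcnt' ocnt'

def rehash (dispatch_observ : List (List (String × String))) : (List (String × Int)) × (List (String × Int)) × List String × List String :=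
  rehashLoop dispatch_observ PySem.Dict.empty PySem.Dict.empty [] [] 0 0

-- ===== PORT B =====
-- B's inner while loop 'head = vals[0]; out.append(head); vals = [v for v in vals[1:] if v != head]'
-- as the structural recursion over the same vals list
def filtDedup (l : List String) : List String :=
  match l with
  | [] => []
  | x :: xs => x :: filtDedup (xs.filter (fun v => v != x))
termination_by l.length
decreasing_by
  simp only [List.length_unattach, List.length_cons]
  exact Nat.lt_succ_of_le ((List.length_filter_le _ _).trans (by simp))

-- {x: i for i, x in enumerate(l)} as an items list (l has no duplicates)
def pvPairs (l : List String) : List (String × Int) :=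
  (PySem.List.enumerate l 0).map (fun p => (p.2, p.1))

def rehash_alt (dispatch_observ : List (List (String × String))) : (List (String × Int)) × (List (String × Int)) × List String × List String :=
  let driver_id_new2orig := filtDedup (dispatch_observ.map (pvGetKey "driver_id"))
  let order_id_new2orig := filtDedup (dispatch_observ.map (pvGetKey "order_id"))
  (pvPairs driver_id_new2orig, pvPairs order_id_new2orig, driver_id_new2orig, order_id_new2orig)

-- ===== PRECONDITION & SPEC =====
-- Pre_ excludes exactly the inputs where an element lacks the "driver_id" or "order_id"
-- key: there A (and B) raise KeyError.
def Pre_rehash (dispatch_observ : List (List (String × String))) : Prop :=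
  (dispatch_observ.all (fun e => (PySem.Dict.mk e).contains "driver_id" && (PySem.Dict.mk e).contains "order_id")) = true
instance (dispatch_observ : List (List (String × String))) : Decidable (Pre_rehash dispatch_observ) := by unfold Pre_rehash; infer_instance

def pvWitness_rehash : (List (List (String × String))) :=
  [[("driver_id", "d1"), ("order_id", "o1")], [("driver_id", "d1"), ("order_id", "o2")]]

def Spec_rehash (dispatch_observ : List (List (String × String))) (out : (List (String × Int)) × (List (String × Int)) × List String × List String) : Prop := out = rehash_alt dispatch_observ
instance (dispatch_observ : List (List (String × String))) (out : (List (String × Int)) × (List (String × Int)) × List String × List String) : Decidable (Spec_rehash dispatch_observ out) := by unfold Spec_rehash; infer_instance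

-- ===== CLAIM (what is proved, stated in full; the proofs are below) =====
def Claim_equal_rehash : Prop := ∀ (dispatch_observ : List (List (String × String))), Dom_rehash dispatch_observ → Pre_rehash dispatch_observ → Spec_rehash dispatch_observ (rehash dispatch_observ)

-- ===== LEMMAS AND PROOFS =====

-- B's filter-based dedup computes first-occurrence dedup: pulling a fresh head x through
-- Set.update is the same as filtering x's duplicates out of the remaining input.
theorem update_cons_not_mem : ∀ (xs s : List String) (x : String), x ∉ s →
    PySem.Set.update (x :: s) xs = x :: PySem.Set.update s (xs.filter (fun v => v != x)) := by
  intro xs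
  induction xs with
  | nil => intro s x _; simp [PySem.Set.update]
  | cons y ys ih =>
    intro s x hx
    by_cases hy : y = x
    · subst hy
      have hadd : PySem.Set.add (y :: s) y = y :: s := by
        simp [PySem.Set.add, PySem.Set.contains]
      simp only [PySem.Set.update, List.foldl_cons, List.filter_cons, bne_self_eq_false,
        hadd] at *
      exact ih s y hx
    · have hne : (y != x) = true := by simp [hy]
      by_cases hys : y ∈ s
      · have h1 : PySem.Set.add (x :: s) y = x :: s := by
          simp [PySem.Set.add, PySem.Set.contains, hys]
        have h2 : PySem.Set.add s y = s := by
          simp [PySem.Set.add, PySem.Set.contains, hys]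
        simp only [PySem.Set.update, List.foldl_cons, List.filter_cons, hne, if_true, h1, h2] at *
        exact ih s x hx
      · have hxy : ¬ x = y := fun h => hy (Eq.symm h)
        have h1 : PySem.Set.add (x :: s) y = x :: (s ++ [y]) := by
          simp [PySem.Set.add, PySem.Set.contains, hys, hy]
        have h2 : PySem.Set.add s y = s ++ [y] := by
          simp [PySem.Set.add, PySem.Set.contains, hys]
        simp only [PySem.Set.update, List.foldl_cons, List.filter_cons, hne, if_true, h1, h2] at *
        exact ih (s ++ [y]) x (by simp [hx, hxy])

theorem filtDedup_eq_ofList : ∀ (l : List String), filtDedup l = PySem.Set.ofList l := by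
  have key : ∀ (n : Nat) (l : List String), l.length ≤ n → filtDedup l = PySem.Set.ofList l := by
    intro n
    induction n with
    | zero =>
      intro l hl
      rw [List.length_eq_zero_iff.mp (Nat.le_zero.mp hl)]
      simp [filtDedup, PySem.Set.ofList]
    | succ n ih =>
      intro l hl
      match l with
      | [] => simp [filtDedup, PySem.Set.ofList]
      | x :: xs =>
        have hofl : PySem.Set.ofList (x :: xs) = PySem.Set.update [x] xs := by
          simp [PySem.Set.ofList, PySem.Set.update, PySem.Set.empty, PySem.Set.add,
            PySem.Set.contains]
        have hlen : (xs.filter (fun v => v != x)).length ≤ n := by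
          have := List.length_filter_le (fun v => v != x) xs
          simp only [List.length_cons] at hl
          omega
        rw [filtDedup, ih _ hlen, hofl, update_cons_not_mem xs [] x (by simp)]
        rfl
  exact fun l => key l.length l (Nat.le_refl _)

theorem map_fst_pvPairs (l : List String) : (pvPairs l).map (·.1) = l := by
  unfold pvPairs
  rw [List.map_map]
  exact PySem.List.map_snd_enumerate l 0

theorem pvPairs_append_singleton (l : List String) (x : String) :
    pvPairs (l ++ [x]) = pvPairs l ++ [(x, (l.length : Int))] := by
  unfold pvPairs
  rw [PySem.List.enumerate_append]
  simp [PySem.List.enumerate_cons, PySem.List.enumerate_nil]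

theorem keys_of_items_pvPairs (d : PySem.Dict String Int) (l : List String)
    (h : d.items = pvPairs l) : d.keys = l := by
  have : d.keys = d.items.map (·.1) := rfl
  rw [this, h, map_fst_pvPairs]

theorem nodup_append_one {l : List String} {x : String} (hl : l.Nodup) (hx : x ∉ l) :
    (l ++ [x]).Nodup :=
  List.Nodup.append hl (List.nodup_singleton x) (by simpa using hx)

theorem loop_eq : ∀ (xs : List (List (String × String))) (d2n o2n : PySem.Dict String Int)
    (dl ol : List String), dl.Nodup → ol.Nodup →
    d2n.items = pvPairs dl → o2n.items = pvPairs ol →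
    rehashLoop xs d2n o2n dl ol (dl.length : Int) (ol.length : Int) =
      (pvPairs (PySem.Set.update dl (xs.map (pvGetKey "driver_id"))),
       pvPairs (PySem.Set.update ol (xs.map (pvGetKey "order_id"))),
       PySem.Set.update dl (xs.map (pvGetKey "driver_id")),
       PySem.Set.update ol (xs.map (pvGetKey "order_id"))) := by
  intro xs
  induction xs with
  | nil =>
    intro d2n o2n dl ol _ _ h1 h2
    simp only [rehashLoop, List.map_nil, PySem.Set.update_nil, h1, h2]
  | cons e rest ih =>
    intro d2n o2n dl ol hdl hol h1 h2
    have hkd : d2n.keys = dl := keys_of_items_pvPairs _ _ h1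
    have hko : o2n.keys = ol := keys_of_items_pvPairs _ _ h2
    have hcd : d2n.contains (pvGetKey "driver_id" e) = decide (pvGetKey "driver_id" e ∈ dl) := by
      rw [PySem.Dict.contains_eq_decide_mem_keys, hkd]
    have hco : o2n.contains (pvGetKey "order_id" e) = decide (pvGetKey "order_id" e ∈ ol) := by
      rw [PySem.Dict.contains_eq_decide_mem_keys, hko]
    simp only [rehashLoop, List.map_cons, PySem.Set.update_cons, hcd, hco]
    by_cases hd : pvGetKey "driver_id" e ∈ dl <;>
      by_cases ho : pvGetKey "order_id" e ∈ ol <;>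
        simp only [hd, ho, decide_true, decide_false, if_true]
    · rw [PySem.Set.add_of_mem hd, PySem.Set.add_of_mem ho]
      exact ih d2n o2n dl ol hdl hol h1 h2
    · rw [PySem.Set.add_of_mem hd, PySem.Set.add_of_not_mem ho]
      have h2' : (o2n.insert (pvGetKey "order_id" e) (ol.length : Int)).items =
          pvPairs (ol ++ [pvGetKey "order_id" e]) := by
        rw [PySem.Dict.items_insert_of_not_contains _ _ (by simp [hco, ho]),
          h2, pvPairs_append_singleton]
      have := ih d2n (o2n.insert (pvGetKey "order_id" e) (ol.length : Int))
        dl (ol ++ [pvGetKey "order_id" e]) hdl (nodup_append_one hol ho) h1 h2'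
      simpa [Int.add_comm] using this
    · rw [PySem.Set.add_of_not_mem hd, PySem.Set.add_of_mem ho]
      have h1' : (d2n.insert (pvGetKey "driver_id" e) (dl.length : Int)).items =
          pvPairs (dl ++ [pvGetKey "driver_id" e]) := by
        rw [PySem.Dict.items_insert_of_not_contains _ _ (by simp [hcd, hd]),
          h1, pvPairs_append_singleton]
      have := ih (d2n.insert (pvGetKey "driver_id" e) (dl.length : Int)) o2n
        (dl ++ [pvGetKey "driver_id" e]) ol (nodup_append_one hdl hd) hol h1' h2
      simpa [Int.add_comm] using this
    · rw [PySem.Set.add_of_not_mem hd, PySem.Set.add_of_not_mem ho]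
      have h1' : (d2n.insert (pvGetKey "driver_id" e) (dl.length : Int)).items =
          pvPairs (dl ++ [pvGetKey "driver_id" e]) := by
        rw [PySem.Dict.items_insert_of_not_contains _ _ (by simp [hcd, hd]),
          h1, pvPairs_append_singleton]
      have h2' : (o2n.insert (pvGetKey "order_id" e) (ol.length : Int)).items =
          pvPairs (ol ++ [pvGetKey "order_id" e]) := by
        rw [PySem.Dict.items_insert_of_not_contains _ _ (by simp [hco, ho]),
          h2, pvPairs_append_singleton]
      have := ih (d2n.insert (pvGetKey "driver_id" e) (dl.length : Int))
        (o2n.insert (pvGetKey "order_id" e) (ol.length : Int))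
        (dl ++ [pvGetKey "driver_id" e]) (ol ++ [pvGetKey "order_id" e])
        (nodup_append_one hdl hd) (nodup_append_one hol ho) h1' h2'
      simpa [Int.add_comm] using this

-- ===== VERDICT (by name: the statement is the Claim_ definition above) =====
theorem rehash_spec : Claim_equal_rehash := by
  intro xs _ _
  unfold Spec_rehash rehash rehash_alt
  have h := loop_eq xs PySem.Dict.empty PySem.Dict.empty [] [] List.nodup_nil List.nodup_nil rfl rfl
  simpa [PySem.Set.update_nil_left, filtDedup_eq_ofList] using h
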